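-- pv_equiv track=rewrite | github.com/rdominguez89/website_ciencia_datos | app/models_ori.py | get_aux_text
-- ===== SOURCE A (Python) =====
-- def _format_with_paired_linebreaks(items):
--     """Helper function to format items with newline after every two items."""
--     if not items:
--         return ""
--     formatted = [
--         str(item) + ('\n' if i % 2 == 1 and i < len(items) - 1 else ', ' if i < len(items) - 1 else '')
--         for i, item in enumerate(items)
--     ]
--     return ''.join(formatted)
--
-- def get_aux_text(params, encoder_columns, standar_scale_columns, prediction_column, columns):
--     sections = []
--
--     # Format params
--     if params:
--         params_text = _format_with_paired_linebreaks([f"{k}: {v}" for k, v in params.items()])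
--         sections.append(params_text)
--
--     # Format encoded columns
--     if encoder_columns:
--         sections.append("Encoded Columns: " + _format_with_paired_linebreaks(encoder_columns))
--
--     # Format scaled columns
--     if standar_scale_columns:
--         sections.append("Scaled Columns: " + _format_with_paired_linebreaks(standar_scale_columns))
--
--     # Format original columns
--     remaining_cols = [col for col in columns
--                      if col not in encoder_columns
--                      and col not in standar_scale_columns
--                      and col != prediction_column]
--     if remaining_cols:
--         sections.append("Original Columns: " + _format_with_paired_linebreaks(remaining_cols))
--
--     return '\n'.join(sections)
-- ===== SOURCE B (Python) =====
-- def _format_with_paired_linebreaks(items):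
--     """Chunk the items into pairs; ', '-join each pair, '\n'-join the pairs."""
--     pairs = [", ".join(str(x) for x in items[i:i + 2])
--              for i in range(0, len(items), 2)]
--     return "\n".join(pairs)
--
-- def get_aux_text(params, encoder_columns, standar_scale_columns, prediction_column, columns):
--     remaining = [c for c in columns
--                  if c not in encoder_columns
--                  and c not in standar_scale_columns
--                  and c != prediction_column]
--     sections = [("", [f"{k}: {v}" for k, v in params.items()]),
--                 ("Encoded Columns: ", encoder_columns),
--                 ("Scaled Columns: ", standar_scale_columns),
--                 ("Original Columns: ", remaining)]
--     return "\n".join(label + _format_with_paired_linebreaks(items)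
--                      for label, items in sections if items)
-- ===== Notes on version B (the rewrite author's own statement) =====
-- stated objective: simpler
-- what changed: The index-parity separator comprehension is replaced by chunking the items into pairs with range(0, len, 2) and slices (', '-join each pair, ' '-join the pairs), and the imperative conditional section appends by a data-driven (label, items) table filtered for non-empty sections.
import Mathlib
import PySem

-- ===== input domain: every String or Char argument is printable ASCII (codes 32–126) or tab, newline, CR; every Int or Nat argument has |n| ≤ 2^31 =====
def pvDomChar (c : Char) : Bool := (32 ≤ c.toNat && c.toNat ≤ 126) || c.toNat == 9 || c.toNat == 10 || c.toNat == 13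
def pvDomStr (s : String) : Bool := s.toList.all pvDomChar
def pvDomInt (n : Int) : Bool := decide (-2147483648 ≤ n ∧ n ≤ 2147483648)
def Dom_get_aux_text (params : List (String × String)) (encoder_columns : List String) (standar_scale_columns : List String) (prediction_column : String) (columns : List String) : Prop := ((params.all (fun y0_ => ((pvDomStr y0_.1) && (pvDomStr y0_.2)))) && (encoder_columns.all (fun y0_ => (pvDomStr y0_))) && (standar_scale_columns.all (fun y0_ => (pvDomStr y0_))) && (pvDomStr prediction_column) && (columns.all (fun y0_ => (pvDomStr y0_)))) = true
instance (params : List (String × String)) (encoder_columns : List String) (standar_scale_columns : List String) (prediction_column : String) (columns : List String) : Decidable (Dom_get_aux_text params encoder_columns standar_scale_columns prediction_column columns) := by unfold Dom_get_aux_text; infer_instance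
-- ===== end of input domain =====

-- B replaces the per-index parity-separator comprehension by chunking the items into
-- pairs (", "-join each pair, "\n"-join the pairs) and a data-driven section table;
-- objective: simpler. Neither program mutates its arguments.

-- ===== PORT A =====
-- _format_with_paired_linebreaks: per-element separator chosen from the element's index
def fmtA (items : List String) : String :=
  if items.isEmpty then ""
  else
    PySem.Str.join "" ((PySem.List.enumerate items 0).map (fun p =>
      p.2 ++ (if PySem.Int.mod p.1 2 == 1 && p.1 < (items.length : Int) - 1 then "\n"
              else if p.1 < (items.length : Int) - 1 then ", " else "")))

def get_aux_text (params : List (String × String)) (encoder_columns : List String) (standar_scale_columns : List String) (prediction_column : String) (columns : List String) : String :=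
  let sections : List String := []
  let sections := if !params.isEmpty
    then sections ++ [fmtA (params.map (fun kv => kv.1 ++ ": " ++ kv.2))] else sections
  let sections := if !encoder_columns.isEmpty
    then sections ++ ["Encoded Columns: " ++ fmtA encoder_columns] else sections
  let sections := if !standar_scale_columns.isEmpty
    then sections ++ ["Scaled Columns: " ++ fmtA standar_scale_columns] else sections
  let remaining_cols := columns.filter (fun col =>
    !(encoder_columns.contains col) && !(standar_scale_columns.contains col) && col != prediction_column)
  let sections := if !remaining_cols.isEmpty
    then sections ++ ["Original Columns: " ++ fmtA remaining_cols] else sections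
  PySem.Str.join "\n" sections

-- ===== PORT B =====
-- chunk into pairs with range(0, len, 2) and slices; ", "-join each pair, "\n"-join the pairs
def fmtB (items : List String) : String :=
  PySem.Str.join "\n" ((PySem.List.pyRange 0 (items.length : Int) 2).map (fun i =>
    PySem.Str.join ", " (PySem.List.slice items (some i) (some (i + 2)))))

def get_aux_text_alt (params : List (String × String)) (encoder_columns : List String) (standar_scale_columns : List String) (prediction_column : String) (columns : List String) : String :=
  let remaining := columns.filter (fun c =>
    !(encoder_columns.contains c) && !(standar_scale_columns.contains c) && c != prediction_column)
  let sections : List (String × List String) :=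
    [("", params.map (fun kv => kv.1 ++ ": " ++ kv.2)),
     ("Encoded Columns: ", encoder_columns),
     ("Scaled Columns: ", standar_scale_columns),
     ("Original Columns: ", remaining)]
  PySem.Str.join "\n" ((sections.filter (fun s => !s.2.isEmpty)).map (fun s => s.1 ++ fmtB s.2))

-- ===== PRECONDITION & SPEC =====
def Spec_get_aux_text (params : List (String × String)) (encoder_columns : List String) (standar_scale_columns : List String) (prediction_column : String) (columns : List String) (out : String) : Prop := out = get_aux_text_alt params encoder_columns standar_scale_columns prediction_column columns
instance (params : List (String × String)) (encoder_columns : List String) (standar_scale_columns : List String) (prediction_column : String) (columns : List String) (out : String) : Decidable (Spec_get_aux_text params encoder_columns standar_scale_columns prediction_column columns out) := by unfold Spec_get_aux_text; infer_instance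

-- ===== CLAIM (what is proved, stated in full; the proofs are below) =====
def Claim_equal_get_aux_text : Prop := ∀ (params : List (String × String)) (encoder_columns : List String) (standar_scale_columns : List String) (prediction_column : String) (columns : List String), Dom_get_aux_text params encoder_columns standar_scale_columns prediction_column columns → Spec_get_aux_text params encoder_columns standar_scale_columns prediction_column columns (get_aux_text params encoder_columns standar_scale_columns prediction_column columns)

-- ===== LEMMAS AND PROOFS =====

lemma chars_join_nil_cons (x : List Char) (l : List (List Char)) :
    PySem.Chars.join [] (x :: l) = x ++ PySem.Chars.join [] l := by
  cases l with
  | nil => simp [PySem.Chars.join, List.intercalate]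
  | cons y t =>
    have := PySem.Chars.join_cons_cons (sep := []) (p := x) (q := y) (rest := t)
    simp only [List.append_nil] at this
    simp [this]

lemma strjoin_nil (s : String) : PySem.Str.join s [] = "" := by
  apply String.toList_inj.mp
  simp [PySem.Str.toList_join, PySem.Chars.join_nil]

lemma strjoin_singleton (s x : String) : PySem.Str.join s [x] = x := by
  apply String.toList_inj.mp
  simp [PySem.Str.toList_join, PySem.Chars.join_singleton]

lemma strjoin_empty_cons (x : String) (l : List String) :
    PySem.Str.join "" (x :: l) = x ++ PySem.Str.join "" l := by
  apply String.toList_inj.mp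
  simp [PySem.Str.toList_join, chars_join_nil_cons]

lemma strjoin_cons_cons (s x y : String) (l : List String) :
    PySem.Str.join s (x :: y :: l) = x ++ s ++ PySem.Str.join s (y :: l) := by
  apply String.toList_inj.mp
  simp [PySem.Str.toList_join, PySem.Chars.join_cons_cons]

lemma mod_succ_even (s : Int) (h : PySem.Int.mod s 2 = 0) : PySem.Int.mod (s + 1) 2 = 1 := by
  rw [PySem.Int.mod_eq_emod_of_pos (by norm_num)] at *
  omega

-- proof-side helper: the paired formatter as a two-at-a-time recursion
def fmtC : List String → String
  | a :: b :: c :: rest => a ++ ", " ++ b ++ "\n" ++ fmtC (c :: rest)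
  | items => PySem.Str.join ", " items

lemma fmtB_reduced (items : List String) :
    fmtB items = PySem.Str.join "\n" ((List.range ((items.length + 1) / 2)).map (fun k =>
      PySem.Str.join ", " (List.take 2 (List.drop (2 * k) items)))) := by
  unfold fmtB
  rw [PySem.List.pyRange_of_pos 0 (items.length : Int) (by norm_num)]
  rw [show (if (0:Int) < items.length then ((((items.length : Int)) - 0 + 2 - 1) / 2).toNat else 0)
        = (items.length + 1) / 2 by split <;> omega]
  rw [List.map_map]
  refine congrArg _ (List.map_congr_left fun k _ => ?_)
  have : ((0:Int) + 2 * (k:Int)) = ((2 * k : Nat) : Int) := by push_cast; ring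
  simp only [Function.comp, this]
  rw [show ((2 * k : Nat) : Int) + 2 = ((2 * k : Nat) : Int) + ((2 : Nat) : Int) by norm_num]
  rw [PySem.List.slice_natCast_add items (2 * k) 2]

lemma fmtB_eq_fmtC (items : List String) : fmtB items = fmtC items := by
  induction items using fmtC.induct with
  | case1 a b c rest ih =>
    rw [fmtB_reduced] at ih ⊢
    simp only [List.length_cons] at ih ⊢
    rw [show (rest.length + 1 + 1 + 1 + 1) / 2 = (rest.length + 1 + 1) / 2 + 1 by omega]
    rw [List.range_succ_eq_map, List.map_cons, List.map_map]
    have hmap : ∀ k, ((fun k => PySem.Str.join ", " (List.take 2 (List.drop (2 * k) (a :: b :: c :: rest)))) ∘ (fun i => i + 1)) k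
        = (fun k => PySem.Str.join ", " (List.take 2 (List.drop (2 * k) (c :: rest)))) k := by
      intro k
      simp only [Function.comp]
      rw [show 2 * (k + 1) = 2 * k + 2 by ring]
      rfl
    rw [List.map_congr_left (fun k _ => hmap k)]
    obtain ⟨y, l, hy⟩ : ∃ y l, (List.range ((rest.length + 1 + 1) / 2)).map (fun k =>
        PySem.Str.join ", " (List.take 2 (List.drop (2 * k) (c :: rest)))) = y :: l := by
      rcases h : (List.range ((rest.length + 1 + 1) / 2)).map (fun k =>
        PySem.Str.join ", " (List.take 2 (List.drop (2 * k) (c :: rest)))) with _ | ⟨y, l⟩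
      · simp [List.range_eq_nil] at h
      · exact ⟨y, l, rfl⟩
    rw [hy] at ih ⊢
    rw [strjoin_cons_cons, ih]
    simp only [Nat.mul_zero, List.drop_zero]
    have h2 : List.take 2 (a :: b :: c :: rest) = [a, b] := rfl
    rw [h2, strjoin_cons_cons, strjoin_singleton]
    simp [fmtC, String.append_assoc]
  | case2 items h =>
    match items with
    | [] => simp [fmtB_reduced, fmtC, strjoin_nil]
    | [a] => simp [fmtB_reduced, fmtC, List.range_one, strjoin_singleton]
    | [a, b] => simp [fmtB_reduced, fmtC, List.range_one, strjoin_singleton]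
    | a :: b :: c :: t => exact absurd rfl (h a b c t)

lemma fmt_eq_aux (items : List String) : ∀ (s n : Int), 0 ≤ s → PySem.Int.mod s 2 = 0 →
    n = s + items.length →
    PySem.Str.join "" ((PySem.List.enumerate items s).map (fun p =>
      p.2 ++ (if PySem.Int.mod p.1 2 == 1 && p.1 < n - 1 then "\n"
              else if p.1 < n - 1 then ", " else ""))) = fmtC items := by
  induction items using fmtC.induct with
  | case1 a b c rest ih =>
    intro s n hs hmod hn
    simp only [List.length_cons] at hn
    have h1 := mod_succ_even s hmod
    have hlt0 : s < n - 1 := by push_cast at hn; omega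
    have hlt1 : s + 1 < n - 1 := by push_cast at hn; omega
    rw [PySem.List.enumerate_cons, PySem.List.enumerate_cons]
    simp only [List.map_cons]
    rw [strjoin_empty_cons, strjoin_empty_cons]
    have h2 : s % 2 = 0 := by
      rw [PySem.Int.mod_eq_emod_of_pos (by norm_num)] at hmod; exact hmod
    rw [ih (s + 1 + 1) n (by omega)
        (by rw [PySem.Int.mod_eq_emod_of_pos (by norm_num)]; omega)
        (by simp only [List.length_cons]; push_cast at hn ⊢; omega)]
    have hm0 : (PySem.Int.mod s 2 == 1) = false := by rw [hmod]; decide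
    have hm1 : (PySem.Int.mod (s + 1) 2 == 1) = true := by rw [h1]; decide
    simp only [fmtC, hm0, hm1, Bool.false_and, Bool.true_and, if_false, Bool.false_eq_true,
      if_pos hlt0, if_pos hlt1, decide_eq_true_eq]
    simp [String.append_assoc]
  | case2 items h =>
    intro s n hs hmod hn
    match items with
    | [] => simp [fmtC, strjoin_nil, PySem.List.enumerate_nil]
    | [a] =>
      have hge : ¬ (s < n - 1) := by simp [List.length_cons] at hn; omega
      simp [fmtC, PySem.List.enumerate_cons, PySem.List.enumerate_nil,
        strjoin_singleton, hge]
    | [a, b] =>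
      have hlt : s < n - 1 := by simp [List.length_cons] at hn; omega
      have hge : ¬ (s + 1 < n - 1) := by simp [List.length_cons] at hn; omega
      have hm0 : (PySem.Int.mod s 2 == 1) = false := by rw [hmod]; decide
      simp only [PySem.List.enumerate_cons, PySem.List.enumerate_nil, List.map_cons, List.map_nil]
      rw [strjoin_cons_cons, strjoin_singleton]
      simp only [fmtC, hm0, Bool.false_and, Bool.false_eq_true, if_false, if_pos hlt, hge]
      rw [strjoin_cons_cons, strjoin_singleton]
      simp [String.append_assoc]
    | a :: b :: c :: t => exact absurd rfl (h a b c t)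

lemma fmtA_eq_fmtB (items : List String) : fmtA items = fmtB items := by
  rw [fmtB_eq_fmtC]
  cases items with
  | nil => simp [fmtA, fmtC, strjoin_nil]
  | cons a t =>
    have := fmt_eq_aux (a :: t) 0 (a :: t).length (by omega) (by decide) (by norm_num)
    simpa [fmtA] using this

-- ===== VERDICT (by name: the statement is the Claim_ definition above) =====
theorem get_aux_text_spec : Claim_equal_get_aux_text := by
  intro params ec sc pc cols _
  unfold Spec_get_aux_text get_aux_text get_aux_text_alt
  by_cases hp : params.isEmpty <;>
  by_cases he : ec.isEmpty <;>
  by_cases hs : sc.isEmpty <;>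
  by_cases hr : (cols.filter (fun c => !(ec.contains c) && !(sc.contains c) && c != pc)).isEmpty <;>
  simp only [fmtA_eq_fmtB, List.isEmpty_map, List.filter_cons, List.filter_nil, hp, he, hs, hr,
    Bool.not_true, Bool.not_false, if_true, if_false, Bool.false_eq_true,
    List.map_cons, List.map_nil, List.nil_append, List.cons_append, String.empty_append]
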